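-- pv_equiv track=rewrite | github.com/galakurpi/datapack500 | data_utils.py | create_facs
-- ===== SOURCE A (Python) =====
-- def create_facs(values, cut_points):
--     """
--     This function creates a list of factors based on a list of values and a list of cut points.
--
--     For each value in 'values', the function determines which of the cut points it is less than or equal to.
--     If a value is less than or equal to a cut point, the corresponding factor is the index of that cut point in the list.
--     If a value is greater than all of the cut points, the corresponding factor is the length of the list of cut points.
--
--     Parameters:
--         values (list): The list of values for which factors will be created.
--         cut_points (list): The list of cut points to use for determining the factors.
--
--     Returns:
--         list: A list of integers representing the factors corresponding to the elements in 'values'.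
--     """
--     facs = []
--
--     for value in values:
--         for i, cut in enumerate(cut_points):
--
--             if value <= cut:
--                 facs.append(i)
--                 break
--         else:
--             facs.append(len(cut_points))
--     return facs
-- ===== SOURCE B (Python) =====
-- def create_facs(values, cut_points):
--     # Prefix maxima of cut_points are nondecreasing, and the first cut point
--     # >= value is exactly the first prefix maximum >= value, so each value can
--     # be placed by binary search instead of a linear scan.
--     prefix_max = []
--     cur = None
--     for c in cut_points:
--         if cur is None or c > cur:
--             cur = c
--         prefix_max.append(cur)
--     m = len(prefix_max)
--     facs = []
--     for v in values:
--         lo, hi = 0, m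
--         while lo < hi:
--             mid = (lo + hi) // 2
--             if prefix_max[mid] < v:
--                 lo = mid + 1
--             else:
--                 hi = mid
--         facs.append(lo)
--     return facs
-- ===== Notes on version B (the rewrite author's own statement) =====
-- stated objective: faster
-- what changed: Replaces the per-value linear scan of cut_points by one prefix-maximum pass over cut_points (the prefix maxima are nondecreasing and have the same first index >= value) followed by a hand-written binary search per value.
import Mathlib
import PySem

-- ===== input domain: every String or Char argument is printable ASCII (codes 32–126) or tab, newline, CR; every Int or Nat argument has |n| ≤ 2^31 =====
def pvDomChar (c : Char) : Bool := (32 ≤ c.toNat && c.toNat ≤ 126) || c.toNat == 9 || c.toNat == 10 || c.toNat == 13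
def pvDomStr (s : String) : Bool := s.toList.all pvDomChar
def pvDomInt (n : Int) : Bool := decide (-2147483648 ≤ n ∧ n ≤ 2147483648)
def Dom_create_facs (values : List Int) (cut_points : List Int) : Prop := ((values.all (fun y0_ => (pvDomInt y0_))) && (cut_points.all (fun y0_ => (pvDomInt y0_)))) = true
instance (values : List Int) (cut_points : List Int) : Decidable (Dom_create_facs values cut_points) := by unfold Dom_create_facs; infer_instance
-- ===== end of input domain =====

-- B replaces A's per-value linear scan with a prefix-maximum pass plus binary search per value (faster asymptotically).

-- ===== PORT A =====
-- inner 'for i, cut in enumerate(cut_points): if value <= cut: break' loop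
def create_facs_loop (value : Int) : List (Int × Int) → Option Int
  | [] => none
  | (i, cut) :: rest => if value ≤ cut then some i else create_facs_loop value rest

def create_facs (values : List Int) (cut_points : List Int) : List Int :=
  values.foldl (fun facs value =>
    match create_facs_loop value (PySem.List.enumerate cut_points) with
    | some i => facs ++ [i]
    | none => facs ++ [(cut_points.length : Int)]) []

-- ===== PORT B =====
-- the 'for c in cut_points' prefix-maximum loop of Source B ('cur' starts as None)
def pmaxLoop : List Int → Option Int → List Int
  | [], _ => []
  | c :: rest, cur =>
      let cur' : Int := match cur with
        | none => c
        | some m => if c > m then c else m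
      cur' :: pmaxLoop rest (some cur')

-- the 'while lo < hi' binary-search loop of Source B; p[mid] is always in range
-- (0 ≤ lo ≤ mid < hi ≤ len p), so pyGetD is exact for Python's p[mid] here;
-- the fuel argument (hi - lo bounds the iteration count) only makes it total
def bisectGo (p : List Int) (v : Int) : Nat → Nat → Nat → Nat
  | 0, lo, _ => lo
  | fuel + 1, lo, hi =>
    if lo < hi then
      let mid := (lo + hi) / 2
      if PySem.List.pyGetD p (mid : Int) 0 < v then bisectGo p v fuel (mid + 1) hi
      else bisectGo p v fuel lo mid
    else lo

def bisectLoop (p : List Int) (v : Int) (lo hi : Nat) : Nat :=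
  bisectGo p v (hi - lo) lo hi

def create_facs_alt (values : List Int) (cut_points : List Int) : List Int :=
  let prefix_max := pmaxLoop cut_points none
  values.foldl (fun facs v =>
    facs ++ [((bisectLoop prefix_max v 0 prefix_max.length : Nat) : Int)]) []

-- ===== PRECONDITION & SPEC =====
def Spec_create_facs (values : List Int) (cut_points : List Int) (out : List Int) : Prop := out = create_facs_alt values cut_points
instance (values : List Int) (cut_points : List Int) (out : List Int) : Decidable (Spec_create_facs values cut_points out) := by unfold Spec_create_facs; infer_instance

-- ===== CLAIM (what is proved, stated in full; the proofs are below) =====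
def Claim_equal_create_facs : Prop := ∀ (values : List Int) (cut_points : List Int), Dom_create_facs values cut_points → Spec_create_facs values cut_points (create_facs values cut_points)

-- ===== LEMMAS AND PROOFS =====

-- A's inner loop over an enumerate suffix computes start + findIdx (v ≤ ·)
theorem loopA_eq (v : Int) : ∀ (cuts : List Int) (s : Int),
    (match create_facs_loop v (PySem.List.enumerate cuts s) with
     | some i => i
     | none => s + (cuts.length : Int))
    = s + (cuts.findIdx (fun c => v ≤ c) : Int) := by
  intro cuts
  induction cuts with
  | nil => intro s; simp [PySem.List.enumerate_nil, create_facs_loop, List.findIdx]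
  | cons c rest ih =>
    intro s
    rw [PySem.List.enumerate_cons]
    have ihs := ih (s + 1)
    by_cases h : v ≤ c
    · simp [create_facs_loop, h, List.findIdx_cons]
    · simp only [create_facs_loop, if_neg h, List.findIdx_cons]
      rcases hm : create_facs_loop v (PySem.List.enumerate rest (s + 1)) with _ | i <;>
        simp [hm, h] at ihs ⊢ <;> omega

-- findIdx characterization
theorem findIdx_char (p : Int → Bool) : ∀ (l : List Int) (k : Nat), k ≤ l.length →
    (∀ j (hj : j < l.length), j < k → ¬ p l[j]) →
    (∀ hk : k < l.length, p l[k]) →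
    l.findIdx p = k := by
  intro l
  induction l with
  | nil => intro k hk _ _; simp at hk ⊢; omega
  | cons x t ih =>
    intro k hk hbef hat
    cases k with
    | zero =>
      have := hat (by simp)
      simp at this
      simp [List.findIdx_cons, this]
    | succ k' =>
      have hx : ¬ p x = true := hbef 0 (by simp) (by omega)
      simp only [List.findIdx_cons, Bool.cond_eq_ite, if_neg hx]
      have : t.findIdx p = k' := by
        apply ih k' (by simpa using hk)
        · intro j hj hjk
          have := hbef (j + 1) (by simpa using Nat.succ_lt_succ hj) (by omega)
          simpa using this
        · intro hk'
          have := hat (by simpa using Nat.succ_lt_succ hk')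
          simpa using this
      omega

-- every element of pmaxLoop l (some m) is ≥ m
theorem pmax_lower : ∀ (l : List Int) (m : Int), ∀ x ∈ pmaxLoop l (some m), m ≤ x := by
  intro l
  induction l with
  | nil => simp [pmaxLoop]
  | cons c rest ih =>
    intro m x hx
    simp only [pmaxLoop, List.mem_cons] at hx
    rcases hx with h | h
    · subst h; split <;> omega
    · have := ih _ x h
      split at this <;> omega

-- pmaxLoop output is nondecreasing
theorem pmax_pairwise : ∀ (l : List Int) (cur : Option Int),
    (pmaxLoop l cur).Pairwise (· ≤ ·) := by
  intro l
  induction l with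
  | nil => intro cur; simp [pmaxLoop]
  | cons c rest ih =>
    intro cur
    simp only [pmaxLoop]
    exact List.Pairwise.cons (fun x hx => pmax_lower rest _ x hx) (ih _)

-- monotone access form of pmax_pairwise
theorem pmax_mono (l : List Int) (cur : Option Int) :
    ∀ i j, (hij : i ≤ j) → (hj : j < (pmaxLoop l cur).length) →
      (pmaxLoop l cur)[i]'(by omega) ≤ (pmaxLoop l cur)[j] := by
  intro i j hij hj
  rcases Nat.eq_or_lt_of_le hij with rfl | hlt
  · exact le_refl _
  · exact (List.pairwise_iff_getElem.mp (pmax_pairwise l cur)) i j (by omega) hj hlt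

-- the first index with v ≤ · agrees on cut_points and its prefix maxima
theorem pmax_findIdx (v : Int) : ∀ (l : List Int) (cur : Option Int),
    (∀ m, cur = some m → m < v) →
    (pmaxLoop l cur).findIdx (fun c => v ≤ c) = l.findIdx (fun c => v ≤ c) := by
  intro l
  induction l with
  | nil => intro cur _; simp [pmaxLoop]
  | cons c rest ih =>
    intro cur hcur
    cases cur with
    | none =>
      simp only [pmaxLoop, List.findIdx_cons]
      by_cases h : v ≤ c
      · simp [h]
      · simp [h, ih (some c) (by intro m hm; injection hm with hm; omega)]
    | some m =>
      have hm : m < v := hcur m rfl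
      simp only [pmaxLoop, List.findIdx_cons]
      by_cases h : v ≤ c
      · have hc : v ≤ (if c > m then c else m) := by split <;> omega
        simp [h, hc]
      · have hnc : ¬ v ≤ (if c > m then c else m) := by split <;> omega
        simp [h, hnc,
          ih (some (if c > m then c else m))
            (by intro m' hm'; injection hm' with hm'; subst hm'; split <;> omega)]

-- binary search on a nondecreasing list computes findIdx (v ≤ ·)
theorem bisect_go_eq (p : List Int) (v : Int)
    (mono : ∀ i j, (hij : i ≤ j) → (hj : j < p.length) → p[i]'(by omega) ≤ p[j]) :
    ∀ fuel lo hi, hi - lo ≤ fuel → lo ≤ hi → hi ≤ p.length →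
    (∀ j (hj : j < p.length), j < lo → p[j] < v) →
    (∀ j (hj : j < p.length), hi ≤ j → v ≤ p[j]) →
    bisectGo p v fuel lo hi = p.findIdx (fun c => v ≤ c) := by
  intro fuel
  induction fuel with
  | zero =>
    intro lo hi hfuel hle hhi hbef haft
    simp only [bisectGo]
    symm
    apply findIdx_char _ _ lo
    · omega
    · intro j hj hjlt
      have := hbef j hj hjlt
      simp
      omega
    · intro hk
      have := haft lo hk (by omega)
      simpa using this
  | succ fuel ih =>
    intro lo hi hfuel hle hhi hbef haft
    simp only [bisectGo]
    by_cases h : lo < hi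
    · rw [if_pos h]
      have hmidlt : (lo + hi) / 2 < hi := by omega
      have hmidge : lo ≤ (lo + hi) / 2 := by omega
      have hmidlen : (lo + hi) / 2 < p.length := by omega
      have hget : PySem.List.pyGetD p (((lo + hi) / 2 : Nat) : Int) 0
          = p[(lo + hi) / 2] := by
        rw [PySem.List.pyGetD_natCast]
        exact List.getD_eq_getElem p 0 hmidlen
      simp only [hget]
      by_cases hc : p[(lo + hi) / 2] < v
      · rw [if_pos hc]
        apply ih _ _ (by omega) (by omega) hhi
        · intro j hj hjlt
          calc p[j] ≤ p[(lo + hi) / 2] := mono j _ (by omega) hmidlen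
            _ < v := hc
        · exact haft
      · rw [if_neg hc]
        apply ih _ _ (by omega) (by omega) (by omega)
        · exact hbef
        · intro j hj hjge
          calc v ≤ p[(lo + hi) / 2] := by omega
            _ ≤ p[j] := mono _ j hjge hj
    · rw [if_neg h]
      symm
      apply findIdx_char _ _ lo
      · omega
      · intro j hj hjlt
        have := hbef j hj hjlt
        simp
        omega
      · intro hk
        have := haft lo hk (by omega)
        simpa using this

-- per-value agreement of the two entry computations
theorem entry_eq (v : Int) (cuts : List Int) :
    (match create_facs_loop v (PySem.List.enumerate cuts 0) with
     | some i => i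
     | none => (cuts.length : Int))
    = ((bisectLoop (pmaxLoop cuts none) v 0 (pmaxLoop cuts none).length : Nat) : Int) := by
  have hA := loopA_eq v cuts 0
  have hB : bisectLoop (pmaxLoop cuts none) v 0 (pmaxLoop cuts none).length
      = (pmaxLoop cuts none).findIdx (fun c => v ≤ c) := by
    unfold bisectLoop
    apply bisect_go_eq (pmaxLoop cuts none) v (pmax_mono cuts none) _ 0 _
      (by omega) (by omega) (le_refl _)
    · intro j hj hjlt; omega
    · intro j hj hge; omega
  have hP := pmax_findIdx v cuts none (by intro m hm; cases hm)
  rw [hB, hP] at *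
  simpa using hA

theorem fold_eq (cuts : List Int) : ∀ (values : List Int) (acc : List Int),
    values.foldl (fun facs value =>
      match create_facs_loop value (PySem.List.enumerate cuts 0) with
      | some i => facs ++ [i]
      | none => facs ++ [(cuts.length : Int)]) acc
    = values.foldl (fun facs v =>
      facs ++ [((bisectLoop (pmaxLoop cuts none) v 0 (pmaxLoop cuts none).length : Nat) : Int)]) acc := by
  intro values
  induction values with
  | nil => intro acc; simp
  | cons v rest ih =>
    intro acc
    simp only [List.foldl_cons]
    have h := entry_eq v cuts
    rw [show (match create_facs_loop v (PySem.List.enumerate cuts 0) with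
        | some i => acc ++ [i]
        | none => acc ++ [(cuts.length : Int)])
      = acc ++ [((bisectLoop (pmaxLoop cuts none) v 0 (pmaxLoop cuts none).length : Nat) : Int)] by
        rcases hm : create_facs_loop v (PySem.List.enumerate cuts 0) with _ | i <;>
          simp [hm] at h ⊢ <;> rw [← h]]
    exact ih _

-- ===== VERDICT (by name: the statement is the Claim_ definition above) =====
theorem create_facs_spec : Claim_equal_create_facs := by
  intro values cut_points _
  unfold Spec_create_facs create_facs create_facs_alt
  exact fold_eq cut_points values []
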